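-- pv_equiv track=rewrite | github.com/nextestudios/Claw3D | server/studio_ai_real_backend.py | assign_multiview_key
-- ===== SOURCE A (Python) =====
-- def assign_multiview_key(role: str, used: set[str]) -> str | None:
--     if role == "front" and "front" not in used:
--         return "front"
--     if role == "back" and "back" not in used:
--         return "back"
--     if role == "side":
--         for candidate in ("left", "right"):
--             if candidate not in used:
--                 return candidate
--     if role == "detail":
--         for candidate in ("left", "right", "back"):
--             if candidate not in used:
--                 return candidate
--     if "front" not in used:
--         return "front"
--     return None
-- ===== SOURCE B (Python) =====
-- # B: rank-based selection — score every view key for the role, return the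
-- # available key with the lowest rank (argmin), instead of scanning per-role
-- # candidate cascades in order.
--
-- _RANK = {
--     ("back", "back"): 0,
--     ("side", "left"): 0,
--     ("side", "right"): 1,
--     ("detail", "left"): 0,
--     ("detail", "right"): 1,
--     ("detail", "back"): 2,
-- }
--
-- def assign_multiview_key(role: str, used: set[str]) -> str | None:
--     best_key = None
--     best_rank = None
--     for key in ("front", "back", "left", "right"):
--         if key in used:
--             continue
--         rank = 9 if key == "front" else _RANK.get((role, key))
--         if rank is None:
--             continue
--         if best_rank is None or rank < best_rank:
--             best_key, best_rank = key, rank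
--     return best_key
-- ===== Notes on version B (the rewrite author's own statement) =====
-- stated objective: alternative
-- what changed: Replaces A's per-role if-cascade of ordered candidate scans by an argmin: each key gets a numeric rank from a (role,key)-keyed table (front always ranked last as the universal fallback) and B loops once over the four keys keeping the lowest-ranked available one.
import Mathlib
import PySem

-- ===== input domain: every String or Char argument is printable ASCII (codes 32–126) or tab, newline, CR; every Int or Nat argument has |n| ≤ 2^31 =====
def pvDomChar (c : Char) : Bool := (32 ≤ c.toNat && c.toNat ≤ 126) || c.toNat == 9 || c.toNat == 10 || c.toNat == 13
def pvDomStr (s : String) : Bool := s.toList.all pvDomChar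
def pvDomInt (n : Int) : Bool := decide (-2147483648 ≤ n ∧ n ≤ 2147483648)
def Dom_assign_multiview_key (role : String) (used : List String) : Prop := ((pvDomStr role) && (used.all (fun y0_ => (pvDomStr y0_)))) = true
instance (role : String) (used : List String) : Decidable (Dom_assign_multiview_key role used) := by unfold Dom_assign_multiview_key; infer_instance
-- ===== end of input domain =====

-- B replaces A's per-role candidate cascade by an argmin over a (role,key) rank table
-- (objective: alternative); return-value equivalence is proved for all inputs.


-- ===== PORT A =====
-- A's inner 'for candidate in (…): if candidate not in used: return candidate' loop
def pvLoopA (cands : List String) (used : List String) : Option String :=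
  match cands with
  | [] => none
  | c :: rest => if used.contains c then pvLoopA rest used else some c

def assign_multiview_key (role : String) (used : List String) : Option String :=
  if role = "front" ∧ ¬ used.contains "front" then some "front"
  else if role = "back" ∧ ¬ used.contains "back" then some "back"
  else
    match (if role = "side" then pvLoopA ["left", "right"] used else none) with
    | some c => some c
    | none =>
      match (if role = "detail" then pvLoopA ["left", "right", "back"] used else none) with
      | some c => some c
      | none => if ¬ used.contains "front" then some "front" else none

-- ===== PORT B =====
-- B's module-level _RANK dict, keyed by (role, key)
def pvRank : PySem.Dict (String × String) Int :=
  ((((((PySem.Dict.empty).insert ("back", "back") 0).insert ("side", "left") 0).insert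
        ("side", "right") 1).insert ("detail", "left") 0).insert
      ("detail", "right") 1).insert ("detail", "back") 2

-- B's single argmin loop over the four keys, accumulator = best (key, rank) so far
def pvArgmin (role : String) (used : List String) :
    List String → Option (String × Int) → Option (String × Int)
  | [], best => best
  | k :: rest, best =>
    if used.contains k then pvArgmin role used rest best
    else
      match (if k = "front" then some (9 : Int) else pvRank.get? (role, k)) with
      | none => pvArgmin role used rest best
      | some r =>
        match best with
        | none => pvArgmin role used rest (some (k, r))
        | some (_, br) =>
          if r < br then pvArgmin role used rest (some (k, r))
          else pvArgmin role used rest best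

def assign_multiview_key_alt (role : String) (used : List String) : Option String :=
  (pvArgmin role used ["front", "back", "left", "right"] none).map Prod.fst

-- ===== PRECONDITION & SPEC =====
def Spec_assign_multiview_key (role : String) (used : List String) (out : Option String) : Prop := out = assign_multiview_key_alt role used
instance (role : String) (used : List String) (out : Option String) : Decidable (Spec_assign_multiview_key role used out) := by unfold Spec_assign_multiview_key; infer_instance

-- ===== CLAIM (what is proved, stated in full; the proofs are below) =====
def Claim_equal_assign_multiview_key : Prop := ∀ (role : String) (used : List String), Dom_assign_multiview_key role used → Spec_assign_multiview_key role used (assign_multiview_key role used)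

-- ===== LEMMAS AND PROOFS =====
theorem pv_pair_beq {a b : Type} [BEq a] [BEq b] (x u : a) (y v : b) :
    ((x, y) == (u, v)) = (x == u && y == v) := rfl


-- ===== VERDICT (by name: the statement is the Claim_ definition above) =====
set_option maxHeartbeats 4000000 in
theorem assign_multiview_key_spec : Claim_equal_assign_multiview_key := by
  intro role used _
  unfold Spec_assign_multiview_key assign_multiview_key assign_multiview_key_alt
  by_cases h1 : role = "front" <;> by_cases h2 : role = "back" <;>
    by_cases h3 : role = "side" <;> by_cases h4 : role = "detail" <;>
    by_cases uf : used.contains "front" <;> by_cases ub : used.contains "back" <;>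
    by_cases ul : used.contains "left" <;> by_cases ur : used.contains "right" <;>
    simp_all [pvRank, pvArgmin, pvLoopA, PySem.Dict.get?, PySem.Dict.insert,
      PySem.Dict.empty] <;>
    first
      | rfl
      | (have e2 : ("back" == role) = false := beq_eq_false_iff_ne.mpr (Ne.symm h2)
         have e3 : ("side" == role) = false := beq_eq_false_iff_ne.mpr (Ne.symm h3)
         have e4 : ("detail" == role) = false := beq_eq_false_iff_ne.mpr (Ne.symm h4)
         simp [List.find?, pv_pair_beq, e2, e3, e4])
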